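-- pv_equiv track=rewrite | github.com/sibirica/Py-SPIDER | discrete/library.py | ordered_index_list_to_labels
-- ===== SOURCE A (Python) =====
-- def ordered_index_list_to_labels(index_list):
--     labels = dict()
--     for i, li in enumerate(index_list):
--         for j, ind in enumerate(li):
--             if ind in labels.keys():
--                 labels[ind].append((i, j))
--             else:
--                 labels[ind] = [(i, j)]
--     return labels
-- ===== SOURCE B (Python) =====
-- def ordered_index_list_to_labels(index_list):
--     # Sort-then-group: stably sort the flattened (value, position) pairs by value
--     # (stable sort keeps positions of equal values in row-major order), split the
--     # sorted list into runs of equal values, then emit the groups keyed in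
--     # first-occurrence order of the values.
--     pairs = sorted(((ind, (i, j))
--                     for i, li in enumerate(index_list)
--                     for j, ind in enumerate(li)), key=lambda p: p[0])
--     groups = {}
--     q, n = 0, len(pairs)
--     while q < n:
--         k = pairs[q][0]
--         r = q
--         while r < n and pairs[r][0] == k:
--             r += 1
--         groups[k] = [p for _, p in pairs[q:r]]
--         q = r
--     return {k: groups[k] for k in dict.fromkeys(ind for li in index_list for ind in li)}
-- ===== Notes on version B (the rewrite author's own statement) =====
-- stated objective: alternative
-- what changed: Replaces the single-pass incremental dict accumulation with sort-then-group: stably sort the flattened (value, position) pairs by value, split the sorted list into runs of equal values, then emit the groups in first-occurrence key order.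
import Mathlib
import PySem

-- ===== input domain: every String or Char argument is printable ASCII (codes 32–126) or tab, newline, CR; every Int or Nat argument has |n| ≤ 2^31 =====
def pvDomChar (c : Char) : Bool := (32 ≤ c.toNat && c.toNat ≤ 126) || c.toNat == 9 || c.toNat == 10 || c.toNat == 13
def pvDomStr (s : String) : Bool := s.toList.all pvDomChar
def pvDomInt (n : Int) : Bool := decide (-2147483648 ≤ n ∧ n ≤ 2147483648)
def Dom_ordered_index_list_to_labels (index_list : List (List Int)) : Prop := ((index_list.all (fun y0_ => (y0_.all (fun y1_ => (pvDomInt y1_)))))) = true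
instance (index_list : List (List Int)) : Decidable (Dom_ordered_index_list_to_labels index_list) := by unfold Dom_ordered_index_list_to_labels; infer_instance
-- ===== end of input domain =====

-- B groups positions by sort-then-group (stable sort of the flattened pairs by value, run-splitting scan, groups emitted in first-occurrence key order) instead of A's single-pass incremental dict accumulation (alternative algorithm, not faster).

-- ===== PORT A =====
def ordered_index_list_to_labels (index_list : List (List Int)) : List (Int × List (Int × Int)) :=
  ((PySem.List.enumerate index_list).foldl (fun d il =>
      (PySem.List.enumerate il.2).foldl (fun d jx =>
        if d.contains jx.2 then d.modify jx.2 [] (fun v => v ++ [(il.1, jx.1)])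
        else d.insert jx.2 [(il.1, jx.1)]) d)
    (PySem.Dict.empty : PySem.Dict Int (List (Int × Int)))).items

-- ===== PORT B =====
-- Source B's while loop scans runs of equal keys with indices q ≤ r over the sorted
-- list; ported by hand, exactly, as takeWhile (the inner 'while pairs[r][0] == k'
-- scan, giving pairs[q+1:r]) and dropWhile (advancing q to r), inserting each
-- run's group into the dict as the loop does.
def pvBuildGroups (s : List (Int × (Int × Int))) (d : PySem.Dict Int (List (Int × Int))) :
    PySem.Dict Int (List (Int × Int)) :=
  match s with
  | [] => d
  | (k, p) :: rest =>
      pvBuildGroups (rest.dropWhile (fun q => q.1 == k))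
        (d.insert k (p :: (rest.takeWhile (fun q => q.1 == k)).map (·.2)))
  termination_by s.length
  decreasing_by
    simpa using Nat.lt_succ_of_le (List.Sublist.length_le (List.dropWhile_sublist _))

def ordered_index_list_to_labels_alt (index_list : List (List Int)) : List (Int × List (Int × Int)) :=
  let pairs := (PySem.List.enumerate index_list).flatMap
    (fun il => (PySem.List.enumerate il.2).map (fun jx => (jx.2, (il.1, jx.1))))
  let groups := pvBuildGroups (PySem.List.sorted pairs (·.1)) PySem.Dict.empty
  (PySem.List.dedup (index_list.flatMap (fun li => li))).map (fun k => (k, groups.getD k []))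

-- ===== PRECONDITION & SPEC =====
def Spec_ordered_index_list_to_labels (index_list : List (List Int)) (out : List (Int × List (Int × Int))) : Prop := out = ordered_index_list_to_labels_alt index_list
instance (index_list : List (List Int)) (out : List (Int × List (Int × Int))) : Decidable (Spec_ordered_index_list_to_labels index_list out) := by unfold Spec_ordered_index_list_to_labels; infer_instance

-- ===== CLAIM =====
def Claim_equal_ordered_index_list_to_labels : Prop := ∀ (index_list : List (List Int)), Dom_ordered_index_list_to_labels index_list → Spec_ordered_index_list_to_labels index_list (ordered_index_list_to_labels index_list)

-- ===== LEMMAS AND PROOFS =====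

-- A's if/else branch on key membership is exactly one Dict.modify step.
theorem step_eq_modify (d : PySem.Dict Int (List (Int × Int))) (k : Int) (p : Int × Int) :
    (if d.contains k then d.modify k [] (fun v => v ++ [p]) else d.insert k [p])
      = d.modify k [] (fun v => v ++ [p]) := by
  by_cases h : d.contains k = true
  · simp [h]
  · simp only [Bool.not_eq_true] at h
    simp [h, PySem.Dict.modify, PySem.Dict.getD_of_not_contains d [] h]

-- A's nested loops fold the flattened pair list with that modify step.
theorem fold_flatten (index_list : List (List Int)) (s : Int)
    (d : PySem.Dict Int (List (Int × Int))) :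
    (PySem.List.enumerate index_list s).foldl (fun d il =>
        (PySem.List.enumerate il.2).foldl (fun d jx =>
          d.modify jx.2 [] (fun v => v ++ [(il.1, jx.1)])) d) d
    = ((PySem.List.enumerate index_list s).flatMap
        (fun il => (PySem.List.enumerate il.2).map (fun jx => (jx.2, (il.1, jx.1))))).foldl
        (fun d p => d.modify p.1 [] (fun v => v ++ [p.2])) d := by
  induction index_list generalizing s d with
  | nil => simp [PySem.List.enumerate_nil]
  | cons li rest ih =>
      simp only [PySem.List.enumerate_cons, List.foldl_cons, List.flatMap_cons, List.foldl_append]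
      rw [ih, List.foldl_map]

-- The first components of the flattened pairs are the flattened values themselves.
theorem map_fst_pairs (l : List (List Int)) (s : Int) :
    (((PySem.List.enumerate l s).flatMap
        (fun il => (PySem.List.enumerate il.2).map (fun jx => (jx.2, (il.1, jx.1))))).map
      Prod.fst) = l.flatMap (fun li => li) := by
  induction l generalizing s with
  | nil => simp [PySem.List.enumerate_nil]
  | cons li rest ih =>
      simp only [PySem.List.enumerate_cons, List.flatMap_cons, List.map_append, List.map_map, ih]
      congr 1
      rw [show (Prod.fst ∘ fun jx : Int × Int => (jx.2, s, jx.1)) = Prod.snd from rfl]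
      exact PySem.List.map_snd_enumerate li 0

-- Unfolding stable insertion at a cons cell.
theorem insertBy_cons (x y : Int × (Int × Int)) (ys : List (Int × (Int × Int))) :
    PySem.List.insertBy (fun a b => decide (a.1 < b.1)) x (y :: ys)
    = if x.1 < y.1 then x :: y :: ys
      else y :: PySem.List.insertBy (fun a b => decide (a.1 < b.1)) x ys := by
  by_cases h : x.1 < y.1 <;> simp [PySem.List.insertBy, h]

-- Stable insertion keeps key-sortedness.
theorem pairwise_insertBy (x : Int × (Int × Int)) (ys : List (Int × (Int × Int)))
    (h : ys.Pairwise (fun a b => a.1 ≤ b.1)) :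
    (PySem.List.insertBy (fun a b => decide (a.1 < b.1)) x ys).Pairwise
      (fun a b => a.1 ≤ b.1) := by
  induction ys with
  | nil => simp [PySem.List.insertBy]
  | cons y ys ih =>
      rw [List.pairwise_cons] at h
      rw [insertBy_cons]
      by_cases hlt : x.1 < y.1
      · rw [if_pos hlt]
        refine List.pairwise_cons.mpr ⟨?_, List.pairwise_cons.mpr h⟩
        intro b hb
        rcases List.mem_cons.mp hb with rfl | hb
        · exact le_of_lt hlt
        · exact le_of_lt (lt_of_lt_of_le hlt (h.1 b hb))
      · rw [if_neg hlt]
        refine List.pairwise_cons.mpr ⟨?_, ih h.2⟩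
        intro b hb
        rcases (PySem.List.mem_insertBy _ _ _ _).mp hb with rfl | hb
        · exact le_of_not_gt hlt
        · exact h.1 b hb

-- Filtering by one key commutes with stable insertion into a key-sorted list.
theorem filter_insertBy (k : Int) (x : Int × (Int × Int)) (ys : List (Int × (Int × Int)))
    (h : ys.Pairwise (fun a b => a.1 ≤ b.1)) :
    (PySem.List.insertBy (fun a b => decide (a.1 < b.1)) x ys).filter (fun q => q.1 == k)
      = ys.filter (fun q => q.1 == k) ++ (if x.1 == k then [x] else []) := by
  induction ys with
  | nil => by_cases hx : x.1 == k <;> simp [PySem.List.insertBy, List.filter, hx]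
  | cons y ys ih =>
      rw [List.pairwise_cons] at h
      rw [insertBy_cons]
      by_cases hlt : x.1 < y.1
      · rw [if_pos hlt]
        by_cases hx : x.1 == k
        · -- x.1 = k, and every key in y::ys exceeds x.1, so the old filter is empty
          have hk : x.1 = k := by simpa using hx
          have hnil : (y :: ys).filter (fun q => q.1 == k) = [] := by
            apply List.filter_eq_nil_iff.mpr
            intro q hq
            have hx' : x.1 < q.1 := by
              rcases List.mem_cons.mp hq with rfl | hq
              · exact hlt
              · exact lt_of_lt_of_le hlt (h.1 q hq)
            simp only [beq_iff_eq]
            omega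
          simp [List.filter_cons, hx, hnil]
        · simp [List.filter_cons, hx]
      · rw [if_neg hlt, List.filter_cons, List.filter_cons, ih h.2]
        by_cases hy : y.1 == k <;> simp [hy]

-- Filtering by one key is invariant under Python's stable sort by key.
theorem filter_sorted (k : Int) (xs : List (Int × (Int × Int))) :
    (PySem.List.sorted xs (·.1)).filter (fun q => q.1 == k) = xs.filter (fun q => q.1 == k) := by
  rw [PySem.List.sorted_eq_foldl_insertBy]
  suffices h : ∀ (acc : List (Int × (Int × Int))), acc.Pairwise (fun a b => a.1 ≤ b.1) →
      (xs.foldl (fun acc x => PySem.List.insertBy (fun a b => decide (a.1 < b.1)) x acc) acc).filter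
        (fun q => q.1 == k)
      = acc.filter (fun q => q.1 == k) ++ xs.filter (fun q => q.1 == k) by
    simpa using h [] (by simp)
  induction xs with
  | nil => intro acc _; simp
  | cons x xs ih =>
      intro acc hacc
      simp only [List.foldl_cons]
      rw [ih _ (pairwise_insertBy x acc hacc), filter_insertBy k x acc hacc, List.filter_cons]
      by_cases hx : x.1 == k <;> simp [hx]

-- After dropping the leading run of key k0 from a key-sorted list bounded below by k0,
-- no element with key k0 remains.
theorem dropWhile_keys_ne (k0 : Int) (l : List (Int × (Int × Int)))
    (h : l.Pairwise (fun a b => a.1 ≤ b.1)) (hb : ∀ q ∈ l, k0 ≤ q.1) :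
    ∀ q ∈ l.dropWhile (fun q => q.1 == k0), q.1 ≠ k0 := by
  induction l with
  | nil => simp
  | cons q0 t ih =>
      rw [List.pairwise_cons] at h
      by_cases h0 : q0.1 == k0
      · rw [List.dropWhile_cons, if_pos h0]
        exact ih h.2 (fun q hq => hb q (List.mem_cons_of_mem _ hq))
      · rw [List.dropWhile_cons, if_neg h0]
        intro q hq
        have hk0 : k0 < q0.1 :=
          lt_of_le_of_ne (hb q0 List.mem_cons_self) (fun e => h0 (by simp [e.symm]))
        rcases List.mem_cons.mp hq with rfl | hq
        · omega
        · have := h.1 q hq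
          omega

-- Lookup in the dict built by the run-splitting scan of a key-sorted list.
theorem getD_pvBuildGroups_aux (n : Nat) :
    ∀ (s : List (Int × (Int × Int))), s.length ≤ n →
      s.Pairwise (fun a b => a.1 ≤ b.1) →
      ∀ (d : PySem.Dict Int (List (Int × Int))) (k : Int),
      (pvBuildGroups s d).getD k []
        = if s.filter (fun q => q.1 == k) = [] then d.getD k []
          else (s.filter (fun q => q.1 == k)).map (·.2) := by
  induction n with
  | zero =>
      intro s hs _ d k
      have : s = [] := List.eq_nil_of_length_eq_zero (Nat.le_zero.mp hs)
      subst this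
      simp [pvBuildGroups]
  | succ n ih =>
      intro s hs h d k
      match s with
      | [] => simp [pvBuildGroups]
      | (k0, p) :: rest =>
        rw [List.pairwise_cons] at h
        have hb : ∀ q ∈ rest, k0 ≤ q.1 := h.1
        have hsplit : rest.takeWhile (fun q => q.1 == k0) ++ rest.dropWhile (fun q => q.1 == k0)
            = rest := List.takeWhile_append_dropWhile
        have hpw' : (rest.dropWhile (fun q => q.1 == k0)).Pairwise (fun a b => a.1 ≤ b.1) :=
          List.Pairwise.sublist (List.dropWhile_sublist _) h.2
        have hlen : (rest.dropWhile (fun q => q.1 == k0)).length ≤ n := by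
          have := List.Sublist.length_le (List.dropWhile_sublist
            (l := rest) (p := fun q : Int × (Int × Int) => q.1 == k0))
          simp at hs
          omega
        have hne : ∀ q ∈ rest.dropWhile (fun q => q.1 == k0), q.1 ≠ k0 :=
          dropWhile_keys_ne k0 rest h.2 hb
        have hfd : (rest.dropWhile (fun q => q.1 == k0)).filter (fun q => q.1 == k0) = [] :=
          List.filter_eq_nil_iff.mpr (fun q hq => by simpa using hne q hq)
        have hrest : rest.filter (fun q => q.1 == k)
            = (rest.takeWhile (fun q => q.1 == k0)).filter (fun q => q.1 == k)
              ++ (rest.dropWhile (fun q => q.1 == k0)).filter (fun q => q.1 == k) := by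
          rw [← List.filter_append, hsplit]
        rw [pvBuildGroups, ih _ hlen hpw']
        by_cases hk : k0 = k
        · subst hk
          have hft : (rest.takeWhile (fun q => q.1 == k0)).filter (fun q => q.1 == k0)
              = rest.takeWhile (fun q => q.1 == k0) :=
            List.filter_eq_self.mpr (fun q hq => List.mem_takeWhile_imp (p := fun q : Int × (Int × Int) => q.1 == k0) hq)
          have hfs : ((k0, p) :: rest).filter (fun q => q.1 == k0)
              = (k0, p) :: rest.takeWhile (fun q => q.1 == k0) := by
            rw [List.filter_cons, if_pos (by simp), hrest, hft, hfd, List.append_nil]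
          rw [hfd, if_pos rfl, hfs, if_neg (List.cons_ne_nil _ _),
              PySem.Dict.getD_insert_self]
          simp
        · have hft : (rest.takeWhile (fun q => q.1 == k0)).filter (fun q => q.1 == k) = [] := by
            apply List.filter_eq_nil_iff.mpr
            intro q hq
            have : q.1 = k0 := by simpa using List.mem_takeWhile_imp (p := fun q : Int × (Int × Int) => q.1 == k0) hq
            simp [this, hk]
          have hfs : ((k0, p) :: rest).filter (fun q => q.1 == k)
              = (rest.dropWhile (fun q => q.1 == k0)).filter (fun q => q.1 == k) := by
            rw [List.filter_cons, if_neg (by simp [hk]), hrest, hft, List.nil_append]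
          rw [hfs]
          have hgi : (d.insert k0 (p :: (rest.takeWhile (fun q => q.1 == k0)).map (·.2))).getD k []
              = d.getD k [] := by
            rw [PySem.Dict.getD_insert]
            simp [Ne.symm hk]
          rw [hgi]

theorem getD_pvBuildGroups (s : List (Int × (Int × Int)))
    (h : s.Pairwise (fun a b => a.1 ≤ b.1)) (d : PySem.Dict Int (List (Int × Int))) (k : Int) :
    (pvBuildGroups s d).getD k []
      = if s.filter (fun q => q.1 == k) = [] then d.getD k []
        else (s.filter (fun q => q.1 == k)).map (·.2) :=
  getD_pvBuildGroups_aux s.length s le_rfl h d k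

theorem ordered_index_list_to_labels_spec : Claim_equal_ordered_index_list_to_labels := by
  intro index_list _
  unfold Spec_ordered_index_list_to_labels ordered_index_list_to_labels ordered_index_list_to_labels_alt
  simp only [step_eq_modify, fold_flatten]
  set pairs := (PySem.List.enumerate index_list).flatMap
    (fun il => (PySem.List.enumerate il.2).map (fun jx => (jx.2, (il.1, jx.1)))) with hp
  set DA := pairs.foldl (fun d p => d.modify p.1 [] (fun v => v ++ [p.2]))
    (PySem.Dict.empty : PySem.Dict Int (List (Int × Int))) with hDA
  have hkA : DA.keys = PySem.Set.ofList (pairs.map Prod.fst) := by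
    rw [hDA, PySem.Dict.keys_foldl_modify_key pairs Prod.fst [] (fun _ p v => v ++ [p.2]),
        PySem.Dict.keys_empty, PySem.Set.update_nil_left]
  have hndA : DA.keys.Nodup := hkA ▸ PySem.Set.nodup_ofList _
  have hgA : ∀ k : Int, DA.getD k [] = (pairs.filter (fun p => p.1 == k)).map (·.2) := by
    intro k
    rw [hDA, PySem.Dict.getD_foldl_modify_append]
    simp [PySem.Dict.getD_empty]
  rw [PySem.Dict.items_eq_map_keys DA hndA [], hkA, hp, map_fst_pairs]
  rw [show PySem.Set.ofList (index_list.flatMap (fun li => li))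
        = PySem.List.dedup (index_list.flatMap (fun li => li)) from
      (PySem.List.dedup_eq_ofList _).symm]
  apply List.map_congr_left
  intro k hk
  have hkmem : k ∈ pairs.map Prod.fst := by
    rw [hp, map_fst_pairs]
    exact (PySem.List.mem_dedup _ _).mp hk
  have hne : pairs.filter (fun q => q.1 == k) ≠ [] := by
    rcases List.mem_map.mp hkmem with ⟨q, hq, rfl⟩
    intro hc
    exact (List.filter_eq_nil_iff.mp hc) q hq (by simp)
  rw [hgA k, getD_pvBuildGroups _ (PySem.List.sorted_pairwise pairs (·.1)) _ k,
      filter_sorted, if_neg hne]
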